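-- pv_equiv track=rewrite | github.com/TheCrypted/InsiderTrader | model/top5companies.py | _pick_best_text_version
-- ===== SOURCE A (Python) =====
-- from typing import List, Tuple, Optional
--
-- VERSION_TYPE_PRIORITY = [
--     "Public Law",
--     "Enrolled Bill",
--     "Resolving Differences",
--     "Agreed to Senate amendment",
--     "Agreed to House amendment",
--     "Passed Senate",
--     "Passed House",
--     "Placed on Calendar Senate",
--     "Placed on Calendar House",
--     "Reported to Senate",
--     "Reported to House",
--     "Introduced in Senate",
--     "Introduced in House",
-- ]
--
-- def _version_priority(vtype: str) -> int:
--     if not vtype: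
--         return len(VERSION_TYPE_PRIORITY) + 1
--     for idx, label in enumerate(VERSION_TYPE_PRIORITY):
--         if label.lower() in vtype.lower():
--             return idx
--     return len(VERSION_TYPE_PRIORITY)
--
-- def _pick_best_text_version(text_versions: List[dict]) -> dict:
--     # Decorate with priority + date (may be None)
--     decorated = []
--     for i, v in enumerate(text_versions):
--         vtype = v.get("type", "") or ""
--         vdate = v.get("date") or ""
--         decorated.append((_version_priority(vtype), vdate, i, v))
--     # Prefer best priority; within that, newest date (lexicographic ISO), then original order
--     best_priority = min(d[0] for d in decorated)
--     candidates = [d for d in decorated if d[0] == best_priority]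
--     candidates.sort(key=lambda t: (t[1], -t[2]), reverse=True)
--     return candidates[0][3]
-- ===== SOURCE B (Python) =====
-- # B: precomputed lowercase label table + next() over a generator for the priority,
-- # and a single linear best-so-far pass instead of A's decorate/min/filter/sort pipeline.
-- _LOWER_LABELS = [
--     "public law", "enrolled bill", "resolving differences",
--     "agreed to senate amendment", "agreed to house amendment",
--     "passed senate", "passed house",
--     "placed on calendar senate", "placed on calendar house",
--     "reported to senate", "reported to house",
--     "introduced in senate", "introduced in house",
-- ]
--
-- def _priority(vtype):
--     if not vtype:
--         return len(_LOWER_LABELS) + 1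
--     low = vtype.lower()
--     return next((i for i, lab in enumerate(_LOWER_LABELS) if lab in low),
--                 len(_LOWER_LABELS))
--
-- def _pick_best_text_version(text_versions):
--     # One pass; strict comparisons keep the earliest index on full ties.
--     best = None
--     for v in text_versions:
--         p = _priority(v.get("type", "") or "")
--         d = v.get("date") or ""
--         if best is None or p < best[0] or (p == best[0] and d > best[1]):
--             best = (p, d, v)
--     if best is None:
--         raise ValueError("empty text_versions")
--     return best[2]
-- ===== Notes on version B (the rewrite author's own statement) =====
-- stated objective: simpler
-- what changed: Replaces the decorate/min/filter/sort-descending pipeline with a single linear best-so-far pass (strict comparisons: lower priority, else strictly newer date), and the priority scan with a next() over a precomputed lowercase label table.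
-- outside the precondition, e.g. on _pick_best_text_version([]): A raises ValueError, B raises ValueError
import Mathlib
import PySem

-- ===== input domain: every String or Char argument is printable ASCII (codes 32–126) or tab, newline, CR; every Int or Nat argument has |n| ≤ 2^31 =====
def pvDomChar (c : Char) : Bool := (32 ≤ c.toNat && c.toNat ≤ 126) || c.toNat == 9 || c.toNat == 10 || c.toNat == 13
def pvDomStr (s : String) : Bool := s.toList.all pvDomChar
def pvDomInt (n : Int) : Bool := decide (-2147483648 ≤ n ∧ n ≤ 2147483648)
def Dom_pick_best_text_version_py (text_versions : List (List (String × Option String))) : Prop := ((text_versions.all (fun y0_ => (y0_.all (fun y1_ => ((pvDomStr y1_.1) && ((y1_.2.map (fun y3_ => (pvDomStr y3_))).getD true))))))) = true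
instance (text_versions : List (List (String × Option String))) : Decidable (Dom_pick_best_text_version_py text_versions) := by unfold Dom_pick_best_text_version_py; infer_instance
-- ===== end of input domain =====

-- B replaces A's decorate/min/filter/sort pipeline by one linear best-so-far pass, and A's
-- per-label lowering loop by a findIdx? over a precomputed lowercase label table (objective: simpler).
-- A sorts a local list it built itself; neither implementation mutates the argument.

-- ===== PORT A =====
def VERSION_TYPE_PRIORITY : List String :=
  ["Public Law", "Enrolled Bill", "Resolving Differences", "Agreed to Senate amendment",
   "Agreed to House amendment", "Passed Senate", "Passed House", "Placed on Calendar Senate",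
   "Placed on Calendar House", "Reported to Senate", "Reported to House",
   "Introduced in Senate", "Introduced in House"]

-- the 'for idx, label in enumerate(...): if label.lower() in vtype.lower(): return idx' loop
def vp_loop (vtype : String) : List (Int × String) → Int
  | [] => (VERSION_TYPE_PRIORITY.length : Int)
  | (idx, label) :: rest =>
    if PySem.Str.isIn (PySem.Str.lower label) (PySem.Str.lower vtype) then idx else vp_loop vtype rest

def version_priority_py (vtype : String) : Int :=
  if vtype = "" then (VERSION_TYPE_PRIORITY.length : Int) + 1
  else vp_loop vtype (PySem.List.enumerate VERSION_TYPE_PRIORITY 0)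

def pick_best_text_version_py (text_versions : List (List (String × Option String))) : List (String × Option String) :=
  let decorated := (PySem.List.enumerate text_versions 0).map (fun iv =>
    (version_priority_py ((((PySem.Dict.mk iv.2).get? "type").getD (some "")).getD ""),
     (((PySem.Dict.mk iv.2).get? "date").getD none).getD "",
     iv.1, iv.2))
  match PySem.List.min? (decorated.map (fun d => d.1)) (fun x => x) with
  | none => []  -- Python: min() over an empty sequence raises ValueError (excluded by Pre_)
  | some best_priority =>
    let candidates := decorated.filter (fun d => d.1 == best_priority)
    match PySem.List.sorted2 candidates (fun t => t.2.1) (fun t => -t.2.2.1) true with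
    | [] => []  -- unreachable: candidates is nonempty
    | c :: _ => c.2.2.2

-- ===== PORT B =====
def LOWER_LABELS : List String :=
  ["public law", "enrolled bill", "resolving differences", "agreed to senate amendment",
   "agreed to house amendment", "passed senate", "passed house", "placed on calendar senate",
   "placed on calendar house", "reported to senate", "reported to house",
   "introduced in senate", "introduced in house"]

-- next((i for i, lab in enumerate(_LOWER_LABELS) if lab in low), len(_LOWER_LABELS))
def priority_alt (vtype : String) : Int :=
  if vtype = "" then (LOWER_LABELS.length : Int) + 1
  else
    let low := PySem.Str.lower vtype
    match LOWER_LABELS.findIdx? (fun lab => PySem.Str.isIn lab low) with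
    | some i => (i : Int)
    | none => (LOWER_LABELS.length : Int)

def pick_best_text_version_py_alt (text_versions : List (List (String × Option String))) : List (String × Option String) :=
  let best := text_versions.foldl (fun best v =>
    let p := priority_alt ((((PySem.Dict.mk v).get? "type").getD (some "")).getD "")
    let d := (((PySem.Dict.mk v).get? "date").getD none).getD ""
    match best with
    | none => some (p, d, v)
    | some b => if p < b.1 ∨ (p = b.1 ∧ d > b.2.1) then some (p, d, v) else some b)
    (none : Option (Int × String × List (String × Option String)))
  match best with
  | none => []  -- Python B: raise ValueError (excluded by Pre_)
  | some b => b.2.2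

-- ===== PRECONDITION & SPEC =====
-- On [] A's min() raises ValueError (and B raises ValueError too); those inputs are excluded.
def Pre_pick_best_text_version_py (text_versions : List (List (String × Option String))) : Prop :=
  text_versions ≠ []
instance (text_versions : List (List (String × Option String))) : Decidable (Pre_pick_best_text_version_py text_versions) := by unfold Pre_pick_best_text_version_py; infer_instance

def pvWitness_pick_best_text_version_py : (List (List (String × Option String))) :=
  [[("type", some "Passed Senate"), ("date", some "2020-01-01")], [("type", some "Public Law"), ("date", none)]]

def Spec_pick_best_text_version_py (text_versions : List (List (String × Option String))) (out : List (String × Option String)) : Prop := out = pick_best_text_version_py_alt text_versions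
instance (text_versions : List (List (String × Option String))) (out : List (String × Option String)) : Decidable (Spec_pick_best_text_version_py text_versions out) := by unfold Spec_pick_best_text_version_py; infer_instance

-- ===== CLAIM (what is proved, stated in full; the proofs are below) =====
def Claim_equal_pick_best_text_version_py : Prop := ∀ (text_versions : List (List (String × Option String))), Dom_pick_best_text_version_py text_versions → Pre_pick_best_text_version_py text_versions → Spec_pick_best_text_version_py text_versions (pick_best_text_version_py text_versions)

-- ===== LEMMAS AND PROOFS =====

-- abbreviations for the proof layer
abbrev pvV : Type := List (String × Option String)
abbrev pvT : Type := Int × String × Int × pvV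

def pvP (v : pvV) : Int := version_priority_py ((((PySem.Dict.mk v).get? "type").getD (some "")).getD "")
def pvD (v : pvV) : String := (((PySem.Dict.mk v).get? "date").getD none).getD ""
def pvDec (iv : Int × pvV) : pvT := (pvP iv.2, pvD iv.2, iv.1, iv.2)

def pvSelUpd (b x : pvT) : pvT := if x.1 < b.1 ∨ (x.1 = b.1 ∧ x.2.1 > b.2.1) then x else b
def pvDateUpd (b x : pvT) : pvT := if b.2.1 < x.2.1 then x else b
def pvBestP (a : Int) (l : List pvT) : Int := l.foldl (fun m x => min m x.1) a

-- A's label loop over an arbitrary suffix equals a findIdx? on the lowered labels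
theorem pv_vp_loop_eq (vt : String) (L : List String) : ∀ (i : Int),
    vp_loop vt (PySem.List.enumerate L i) =
      match L.findIdx? (fun lab => PySem.Chars.isIn (PySem.Chars.lower lab.toList) (PySem.Chars.lower vt.toList)) with
      | some k => i + (k : Int)
      | none => (VERSION_TYPE_PRIORITY.length : Int) := by
  induction L with
  | nil => intro i; simp [PySem.List.enumerate_nil, vp_loop, List.findIdx?_nil]
  | cons lab L ih =>
    intro i
    rw [PySem.List.enumerate_cons]
    simp only [vp_loop, List.findIdx?_cons]
    by_cases h : PySem.Str.isIn (PySem.Str.lower lab) (PySem.Str.lower vt) = true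
    · have hC : PySem.Chars.isIn (PySem.Chars.lower lab.toList) (PySem.Chars.lower vt.toList) = true := by simpa using h
      simp [hC]
    · have hC : PySem.Chars.isIn (PySem.Chars.lower lab.toList) (PySem.Chars.lower vt.toList) = false := by simpa using h
      rw [if_neg h, ih (i + 1)]
      simp only [hC, Bool.false_eq_true, if_false]
      cases hf : L.findIdx? (fun lab => PySem.Chars.isIn (PySem.Chars.lower lab.toList) (PySem.Chars.lower vt.toList)) with
      | none => rfl
      | some k => simp only [Option.map_some]; push_cast; ring

-- the lowercase label table is literally the lowered priority table
set_option maxHeartbeats 1000000 in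
theorem pv_lower_table : LOWER_LABELS = VERSION_TYPE_PRIORITY.map PySem.Str.lower := by decide

-- B's priority helper equals A's
theorem pv_vp_eq (s : String) : priority_alt s = version_priority_py s := by
  unfold priority_alt version_priority_py
  by_cases h : s = ""
  · simp [h]; rfl
  · simp only [h, if_false]
    rw [pv_lower_table, List.findIdx?_map,
      show ((fun lab => PySem.Str.isIn lab (PySem.Str.lower s)) ∘ PySem.Str.lower)
          = (fun lab => PySem.Chars.isIn (PySem.Chars.lower lab.toList) (PySem.Chars.lower s.toList)) from by
        funext lab; simp [Function.comp],
      pv_vp_loop_eq s VERSION_TYPE_PRIORITY 0]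
    cases hf : VERSION_TYPE_PRIORITY.findIdx?
        (fun lab => PySem.Chars.isIn (PySem.Chars.lower lab.toList) (PySem.Chars.lower s.toList)) with
    | none => simp
    | some k => simp

theorem pvBestP_le (l : List pvT) (a : Int) : pvBestP a l ≤ a := by
  induction l generalizing a with
  | nil => simp [pvBestP]
  | cons x l ih =>
    have := ih (min a x.1)
    simp only [pvBestP, List.foldl_cons] at *
    exact le_trans this (min_le_left _ _)

theorem pvBestP_attained (l : List pvT) (a : Int) :
    pvBestP a l = a ∨ ∃ x ∈ l, pvBestP a l = x.1 := by
  induction l generalizing a with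
  | nil => left; rfl
  | cons x l ih =>
    simp only [pvBestP, List.foldl_cons] at *
    rcases ih (min a x.1) with h | ⟨y, hy, h⟩
    · rcases le_total a x.1 with hle | hle
      · left; rw [h, min_eq_left hle]
      · right; exact ⟨x, by simp, by rw [h, min_eq_right hle]⟩
    · right; exact ⟨y, by simp [hy], h⟩

-- head of an insertion-sort fold started on a nonempty accumulator
theorem pvInsertBy_head {α : Type} (before : α → α → Bool) (l : List α) :
    ∀ (b : α) (t : List α), ∃ t',
      l.foldl (fun acc x => PySem.List.insertBy before x acc) (b :: t)
        = (l.foldl (fun c x => if before x c then x else c) b) :: t' := by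
  induction l with
  | nil => exact fun b t => ⟨t, rfl⟩
  | cons x l ih =>
    intro b t
    simp only [List.foldl_cons, PySem.List.insertBy]
    by_cases h : before x b = true
    · simpa [h] using ih x (b :: t)
    · simpa [h] using ih b (PySem.List.insertBy before x t)

-- the reverse-sort comparison reduces to a date comparison while indices increase
theorem pvDateFold (l : List pvT) : ∀ (b : pvT),
    (b :: l).Pairwise (fun a c => a.2.2.1 < c.2.2.1) →
    l.foldl (fun c x =>
        if (decide (c.2.1 < x.2.1) || (!decide (x.2.1 < c.2.1) && decide (-c.2.2.1 < -x.2.2.1))) then x else c) b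
      = l.foldl (fun c x => pvDateUpd c x) b := by
  induction l with
  | nil => intro b _; rfl
  | cons x l ih =>
    intro b hp
    have hbx : b.2.2.1 < x.2.2.1 := (List.pairwise_cons.1 hp).1 x (by simp)
    have hpx : (x :: l).Pairwise (fun a c => a.2.2.1 < c.2.2.1) := (List.pairwise_cons.1 hp).2
    have hidx : decide (-b.2.2.1 < -x.2.2.1) = false := by simp; omega
    simp only [List.foldl_cons, hidx, Bool.and_false, Bool.or_false]
    by_cases h : b.2.1 < x.2.1
    · simp only [h, decide_true, if_true, pvDateUpd]
      exact ih x hpx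
    · simp only [h, decide_false, if_false, pvDateUpd]
      apply ih b
      refine List.pairwise_cons.2 ⟨?_, (List.pairwise_cons.1 hpx).2⟩
      intro c hc
      exact lt_trans hbx ((List.pairwise_cons.1 hpx).1 c hc)

-- the single-pass selection equals the min/filter/max-date pipeline
theorem pvSel_eq (l : List pvT) : ∀ (b c : pvT) (cs : List pvT),
    (b :: l).filter (fun x => x.1 == pvBestP b.1 l) = c :: cs →
    l.foldl pvSelUpd b = cs.foldl pvDateUpd c := by
  induction l with
  | nil =>
    intro b c cs h
    simp [pvBestP, List.filter] at h
    obtain ⟨hc, hcs⟩ := h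
    simp [List.foldl_nil, ← hc, hcs]
  | cons x l ih =>
    intro b c cs h
    have hminx : pvBestP b.1 (x :: l) = pvBestP (min b.1 x.1) l := by
      simp [pvBestP]
    by_cases hcond : x.1 < b.1 ∨ (x.1 = b.1 ∧ x.2.1 > b.2.1)
    · -- the running best is replaced by x
      have hminbx : min b.1 x.1 = x.1 := by
        rcases hcond with h1 | ⟨h1, _⟩
        · exact min_eq_right (le_of_lt h1)
        · rw [h1]; exact min_self _
      have hm : pvBestP b.1 (x :: l) = pvBestP x.1 l := by rw [hminx, hminbx]
      simp only [hm] at h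
      simp only [List.foldl_cons, pvSelUpd, if_pos hcond]
      rcases hcond with h1 | ⟨h1, h2⟩
      · -- x.1 < b.1 : b is not a candidate
        have hble := pvBestP_le l x.1
        rw [List.filter_cons_of_neg (by simp; omega)] at h
        exact ih x c cs h
      · -- equal priority, strictly newer date: x replaces b
        by_cases hbm : b.1 = pvBestP x.1 l
        · have hxm : x.1 = pvBestP x.1 l := h1.trans hbm
          rw [List.filter_cons_of_pos (by simp [← hbm])] at h
          have hfx : (x :: l).filter (fun y => y.1 == pvBestP x.1 l)
              = x :: l.filter (fun y => y.1 == pvBestP x.1 l) :=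
            List.filter_cons_of_pos (by simp [← hxm])
          rw [hfx] at h
          obtain ⟨hc, hcs⟩ := List.cons.inj h
          rw [← hcs, ← hc, List.foldl_cons,
            show pvDateUpd b x = x from by unfold pvDateUpd; exact if_pos h2]
          exact ih x x _ hfx
        · rw [List.filter_cons_of_neg (by simpa using hbm)] at h
          exact ih x c cs h
    · -- the running best is kept
      have hcond' : ¬ x.1 < b.1 ∧ (x.1 = b.1 → ¬ x.2.1 > b.2.1) := by
        constructor
        · intro hlt; exact hcond (Or.inl hlt)
        · intro he hgt; exact hcond (Or.inr ⟨he, hgt⟩)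
      have hbx : b.1 ≤ x.1 := le_of_not_gt hcond'.1
      have hm : pvBestP b.1 (x :: l) = pvBestP b.1 l := by
        rw [hminx, min_eq_left hbx]
      simp only [hm] at h
      simp only [List.foldl_cons, pvSelUpd, if_neg hcond]
      by_cases hxm : x.1 = pvBestP b.1 l
      · -- x ties the best priority: then b does too, and x's date is not newer
        have hble := pvBestP_le l b.1
        have hbm : b.1 = pvBestP b.1 l := by omega
        have hdx : ¬ x.2.1 > b.2.1 := hcond'.2 (hxm.trans hbm.symm)
        rw [List.filter_cons_of_pos (by simp [← hbm]),
          List.filter_cons_of_pos (by simp [← hxm])] at h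
        obtain ⟨hc, hcs⟩ := List.cons.inj h
        rw [← hcs, ← hc, List.foldl_cons,
          show pvDateUpd b x = b from by unfold pvDateUpd; exact if_neg hdx]
        exact ih b b _ (List.filter_cons_of_pos (by simp [← hbm]))
      · -- x is not a candidate
        have hdrop : (b :: x :: l).filter (fun y => y.1 == pvBestP b.1 l)
            = (b :: l).filter (fun y => y.1 == pvBestP b.1 l) := by
          have hx : ((x.1 == pvBestP b.1 l) : Bool) = false := by simpa using hxm
          simp only [List.filter_cons, hx, Bool.false_eq_true, if_false]
        rw [hdrop] at h
        exact ih b c cs h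

-- the candidate list is never empty
theorem pvFilter_ne_nil (l : List pvT) (b : pvT) :
    (b :: l).filter (fun x => x.1 == pvBestP b.1 l) ≠ [] := by
  intro h
  rw [List.filter_eq_nil_iff] at h
  rcases pvBestP_attained l b.1 with hm | ⟨y, hy, hm⟩
  · exact h b (by simp) (by simp [hm])
  · exact h y (by simp [hy]) (by simp [hm])

-- B's per-element step (literally the lambda of pick_best_text_version_py_alt)
def pvBStep (best : Option (Int × String × pvV)) (v : pvV) : Option (Int × String × pvV) :=
  let p := priority_alt ((((PySem.Dict.mk v).get? "type").getD (some "")).getD "")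
  let d := (((PySem.Dict.mk v).get? "date").getD none).getD ""
  match best with
  | none => some (p, d, v)
  | some b => if p < b.1 ∨ (p = b.1 ∧ d > b.2.1) then some (p, d, v) else some b

theorem pvBStep_eq (best : Option (Int × String × pvV)) (v : pvV) :
    pvBStep best v =
      match best with
      | none => some (pvP v, pvD v, v)
      | some b => if pvP v < b.1 ∨ (pvP v = b.1 ∧ pvD v > b.2.1) then some (pvP v, pvD v, v) else some b := by
  simp only [pvBStep, pv_vp_eq, pvP, pvD]

-- B's fold over the raw versions tracks the quadruple fold over the decorated list
theorem pvStrip (l : List pvV) : ∀ (i : Int) (b : pvT),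
    l.foldl pvBStep (some (b.1, b.2.1, b.2.2.2))
      = some ((((PySem.List.enumerate l i).map pvDec).foldl pvSelUpd b).1,
          (((PySem.List.enumerate l i).map pvDec).foldl pvSelUpd b).2.1,
          (((PySem.List.enumerate l i).map pvDec).foldl pvSelUpd b).2.2.2) := by
  induction l with
  | nil => intro i b; rfl
  | cons v l ih =>
    intro i b
    rw [PySem.List.enumerate_cons, List.map_cons, List.foldl_cons, List.foldl_cons, pvBStep_eq]
    by_cases h : (pvDec (i, v)).1 < b.1 ∨ ((pvDec (i, v)).1 = b.1 ∧ (pvDec (i, v)).2.1 > b.2.1)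
    · have h' : pvP v < b.1 ∨ (pvP v = b.1 ∧ pvD v > b.2.1) := by simpa [pvDec] using h
      rw [show (match (some (b.1, b.2.1, b.2.2.2) : Option (Int × String × pvV)) with
          | none => some (pvP v, pvD v, v)
          | some bb => if pvP v < bb.1 ∨ (pvP v = bb.1 ∧ pvD v > bb.2.1) then some (pvP v, pvD v, v) else some bb)
          = some (pvP v, pvD v, v) from if_pos h']
      rw [show pvSelUpd b (pvDec (i, v)) = pvDec (i, v) from by unfold pvSelUpd; exact if_pos h]
      exact ih (i + 1) (pvDec (i, v))
    · have h' : ¬ (pvP v < b.1 ∨ (pvP v = b.1 ∧ pvD v > b.2.1)) := by simpa [pvDec] using h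
      rw [show (match (some (b.1, b.2.1, b.2.2.2) : Option (Int × String × pvV)) with
          | none => some (pvP v, pvD v, v)
          | some bb => if pvP v < bb.1 ∨ (pvP v = bb.1 ∧ pvD v > bb.2.1) then some (pvP v, pvD v, v) else some bb)
          = some (b.1, b.2.1, b.2.2.2) from if_neg h']
      rw [show pvSelUpd b (pvDec (i, v)) = b from by unfold pvSelUpd; exact if_neg h]
      exact ih (i + 1) b

-- the decorated list has strictly increasing indices
theorem pvDec_pairwise (l : List pvV) (i : Int) :
    ((PySem.List.enumerate l i).map pvDec).Pairwise (fun a c : pvT => a.2.2.1 < c.2.2.1) := by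
  apply List.Pairwise.map
  · intro a b h
    exact h
  · exact PySem.List.pairwise_lt_enumerate l i

-- ===== VERDICT (by name: the statement is the Claim_ definition above) =====
theorem pick_best_text_version_py_spec : Claim_equal_pick_best_text_version_py := by
  intro tvs _dom hpre
  unfold Spec_pick_best_text_version_py
  cases tvs with
  | nil => exact absurd rfl hpre
  | cons v rest =>
    have hfun : (fun iv : Int × pvV =>
        (version_priority_py ((((PySem.Dict.mk iv.2).get? "type").getD (some "")).getD ""),
         (((PySem.Dict.mk iv.2).get? "date").getD none).getD "", iv.1, iv.2)) = pvDec := by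
      funext iv; rfl
    set tl : List pvT := (PySem.List.enumerate rest 1).map pvDec with htl
    set d0 : pvT := pvDec (0, v) with hd0
    have hdec : (PySem.List.enumerate (v :: rest) 0).map pvDec = d0 :: tl := by
      rw [PySem.List.enumerate_cons, List.map_cons]
      norm_num [htl, hd0]
    have hmin : PySem.List.min? ((d0 :: tl).map (fun d => d.1)) (fun x => x)
        = some (pvBestP d0.1 tl) := by
      rw [List.map_cons, PySem.List.min?_id_cons, List.foldl_map]
      rfl
    obtain ⟨c, cs, hfil⟩ : ∃ c cs, (d0 :: tl).filter (fun x => x.1 == pvBestP d0.1 tl) = c :: cs := by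
      cases h : (d0 :: tl).filter (fun x => x.1 == pvBestP d0.1 tl) with
      | nil => exact absurd h (pvFilter_ne_nil tl d0)
      | cons c cs => exact ⟨c, cs, rfl⟩
    have hpw : (d0 :: tl).Pairwise (fun a c : pvT => a.2.2.1 < c.2.2.1) := by
      have := pvDec_pairwise (v :: rest) 0
      rwa [hdec] at this
    have hpwf : (c :: cs).Pairwise (fun a c : pvT => a.2.2.1 < c.2.2.1) := by
      rw [← hfil]; exact hpw.sublist List.filter_sublist
    obtain ⟨t', hsorted⟩ := pvInsertBy_head
      (fun a b : pvT => (decide (b.2.1 < a.2.1) || (!decide (a.2.1 < b.2.1) && decide (-b.2.2.1 < -a.2.2.1)))) cs c []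
    have hs2 : PySem.List.sorted2 (c :: cs) (fun t : pvT => t.2.1) (fun t : pvT => -t.2.2.1) true
        = (cs.foldl (fun cc x =>
            if (decide (cc.2.1 < x.2.1) || (!decide (x.2.1 < cc.2.1) && decide (-cc.2.2.1 < -x.2.2.1))) then x else cc) c) :: t' := by
      show List.foldl (fun acc x => PySem.List.insertBy
          (fun a b : pvT => (decide (b.2.1 < a.2.1) || (!decide (a.2.1 < b.2.1) && decide (-b.2.2.1 < -a.2.2.1)))) x acc)
          [] (c :: cs) = _
      rw [List.foldl_cons]
      rw [show PySem.List.insertBy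
          (fun a b : pvT => (decide (b.2.1 < a.2.1) || (!decide (a.2.1 < b.2.1) && decide (-b.2.2.1 < -a.2.2.1))))
          c ([] : List pvT) = [c] from rfl]
      exact hsorted
    have hA : pick_best_text_version_py (v :: rest) = (cs.foldl pvDateUpd c).2.2.2 := by
      simp only [pick_best_text_version_py]
      rw [hfun, hdec, hmin]
      show (match PySem.List.sorted2 ((d0 :: tl).filter (fun d => d.1 == pvBestP d0.1 tl))
            (fun t : pvT => t.2.1) (fun t : pvT => -t.2.2.1) true with
          | [] => ([] : pvV)
          | c :: _ => c.2.2.2) = (cs.foldl pvDateUpd c).2.2.2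
      rw [hfil, hs2]
      show (cs.foldl (fun cc x =>
          if (decide (cc.2.1 < x.2.1) || (!decide (x.2.1 < cc.2.1) && decide (-cc.2.2.1 < -x.2.2.1))) then x else cc) c).2.2.2
        = (cs.foldl pvDateUpd c).2.2.2
      exact congrArg (fun z : pvT => z.2.2.2) (pvDateFold cs c hpwf)
    have hB : pick_best_text_version_py_alt (v :: rest) = (tl.foldl pvSelUpd d0).2.2.2 := by
      have hBdef : pick_best_text_version_py_alt (v :: rest)
          = (match (v :: rest).foldl pvBStep none with
             | none => ([] : pvV)
             | some b => b.2.2) := rfl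
      rw [hBdef, List.foldl_cons]
      rw [show pvBStep none v = some (d0.1, d0.2.1, d0.2.2.2) from by rw [pvBStep_eq]; simp [hd0, pvDec]]
      rw [pvStrip rest 1 d0]
    rw [hA, hB, pvSel_eq tl d0 c cs hfil]
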